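-- pv_equiv track=rewrite | github.com/Joshi-e8/resume-screener | backend/app/services/linkedin_service.py | _get_job_function_code
-- ===== SOURCE A (Python) =====
-- def _get_job_function_code(job_title: str) -> str:
--     """
--     Map job title to LinkedIn job function code
--     """
--     title_lower = job_title.lower()
--
--     if any(term in title_lower for term in ["engineer", "developer", "programmer", "architect"]):
--         return "eng"
--     elif any(term in title_lower for term in ["sales", "account", "business development"]):
--         return "sal"
--     elif any(term in title_lower for term in ["marketing", "brand", "content", "social media"]):
--         return "mkt"
--     elif any(term in title_lower for term in ["hr", "human resources", "recruiter", "talent"]):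
--         return "hum"
--     elif any(term in title_lower for term in ["finance", "accounting", "controller", "analyst"]):
--         return "fin"
--     elif any(term in title_lower for term in ["operations", "logistics", "supply chain"]):
--         return "ops"
--     elif any(term in title_lower for term in ["design", "creative", "ux", "ui"]):
--         return "des"
--     elif any(term in title_lower for term in ["legal", "counsel", "attorney", "compliance"]):
--         return "leg"
--     elif any(term in title_lower for term in ["consulting", "strategy", "advisory"]):
--         return "con"
--     else:
--         return "oth"  # Other
-- ===== SOURCE B (Python) =====
-- # B: single-pass minimum-priority scan over a flat (term, priority, code) list
-- # instead of A's ordered if/elif chain of any() checks.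
-- _TERMS = [
--     ("engineer", 0, "eng"), ("developer", 0, "eng"), ("programmer", 0, "eng"), ("architect", 0, "eng"),
--     ("sales", 1, "sal"), ("account", 1, "sal"), ("business development", 1, "sal"),
--     ("marketing", 2, "mkt"), ("brand", 2, "mkt"), ("content", 2, "mkt"), ("social media", 2, "mkt"),
--     ("hr", 3, "hum"), ("human resources", 3, "hum"), ("recruiter", 3, "hum"), ("talent", 3, "hum"),
--     ("finance", 4, "fin"), ("accounting", 4, "fin"), ("controller", 4, "fin"), ("analyst", 4, "fin"),
--     ("operations", 5, "ops"), ("logistics", 5, "ops"), ("supply chain", 5, "ops"),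
--     ("design", 6, "des"), ("creative", 6, "des"), ("ux", 6, "des"), ("ui", 6, "des"),
--     ("legal", 7, "leg"), ("counsel", 7, "leg"), ("attorney", 7, "leg"), ("compliance", 7, "leg"),
--     ("consulting", 8, "con"), ("strategy", 8, "con"), ("advisory", 8, "con"),
-- ]
--
--
-- def _get_job_function_code(job_title: str) -> str:
--     title_lower = job_title.lower()
--     best = None
--     for term, prio, code in _TERMS:
--         if term in title_lower and (best is None or prio < best[0]):
--             best = (prio, code)
--     return best[1] if best is not None else "oth"
-- ===== Notes on version B (the rewrite author's own statement) =====
-- stated objective: alternative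
-- what changed: Instead of A's ordered if/elif chain with an any() per category and early return, B makes a single pass over a flat (term, priority, code) list, tracking the minimum-priority matching term, and returns its code (or 'oth'); priority order makes this equal to the chain's first-match rule.
import Mathlib
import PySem

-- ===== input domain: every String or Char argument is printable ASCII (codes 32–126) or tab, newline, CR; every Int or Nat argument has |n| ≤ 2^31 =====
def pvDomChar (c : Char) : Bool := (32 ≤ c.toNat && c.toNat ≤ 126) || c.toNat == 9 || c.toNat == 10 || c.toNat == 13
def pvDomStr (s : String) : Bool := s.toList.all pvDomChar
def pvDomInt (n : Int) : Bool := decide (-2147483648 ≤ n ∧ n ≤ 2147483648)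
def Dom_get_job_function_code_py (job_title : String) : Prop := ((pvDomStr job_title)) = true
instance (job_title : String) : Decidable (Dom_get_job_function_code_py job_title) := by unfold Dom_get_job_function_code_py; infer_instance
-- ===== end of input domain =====

-- B replaces A's early-return if/elif chain by a single minimum-priority scan over a flat (term, priority, code) list (alternative; same cost).

-- ===== PORT A =====
def get_job_function_code_py (job_title : String) : String :=
  let title_lower := PySem.Str.lower job_title
  if (["engineer", "developer", "programmer", "architect"].any fun term => PySem.Str.isIn term title_lower) then
    "eng"
  else if (["sales", "account", "business development"].any fun term => PySem.Str.isIn term title_lower) then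
    "sal"
  else if (["marketing", "brand", "content", "social media"].any fun term => PySem.Str.isIn term title_lower) then
    "mkt"
  else if (["hr", "human resources", "recruiter", "talent"].any fun term => PySem.Str.isIn term title_lower) then
    "hum"
  else if (["finance", "accounting", "controller", "analyst"].any fun term => PySem.Str.isIn term title_lower) then
    "fin"
  else if (["operations", "logistics", "supply chain"].any fun term => PySem.Str.isIn term title_lower) then
    "ops"
  else if (["design", "creative", "ux", "ui"].any fun term => PySem.Str.isIn term title_lower) then
    "des"
  else if (["legal", "counsel", "attorney", "compliance"].any fun term => PySem.Str.isIn term title_lower) then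
    "leg"
  else if (["consulting", "strategy", "advisory"].any fun term => PySem.Str.isIn term title_lower) then
    "con"
  else
    "oth"

-- ===== PORT B =====
-- the flat (term, priority, code) table from Source B
def pvTerms : List (String × Nat × String) :=
  [("engineer", 0, "eng"), ("developer", 0, "eng"), ("programmer", 0, "eng"), ("architect", 0, "eng"),
   ("sales", 1, "sal"), ("account", 1, "sal"), ("business development", 1, "sal"),
   ("marketing", 2, "mkt"), ("brand", 2, "mkt"), ("content", 2, "mkt"), ("social media", 2, "mkt"),
   ("hr", 3, "hum"), ("human resources", 3, "hum"), ("recruiter", 3, "hum"), ("talent", 3, "hum"),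
   ("finance", 4, "fin"), ("accounting", 4, "fin"), ("controller", 4, "fin"), ("analyst", 4, "fin"),
   ("operations", 5, "ops"), ("logistics", 5, "ops"), ("supply chain", 5, "ops"),
   ("design", 6, "des"), ("creative", 6, "des"), ("ux", 6, "des"), ("ui", 6, "des"),
   ("legal", 7, "leg"), ("counsel", 7, "leg"), ("attorney", 7, "leg"), ("compliance", 7, "leg"),
   ("consulting", 8, "con"), ("strategy", 8, "con"), ("advisory", 8, "con")]

-- one iteration of Source B's loop body
def pvStep (title_lower : String) (best : Option (Nat × String)) (e : String × Nat × String) : Option (Nat × String) :=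
  if PySem.Str.isIn e.1 title_lower
      && (match best with | none => true | some (b, _) => decide (e.2.1 < b)) then
    some (e.2.1, e.2.2)
  else
    best

def get_job_function_code_py_alt (job_title : String) : String :=
  let title_lower := PySem.Str.lower job_title
  match pvTerms.foldl (pvStep title_lower) none with
  | some (_, code) => code
  | none => "oth"

-- ===== PRECONDITION & SPEC =====
def Spec_get_job_function_code_py (job_title : String) (out : String) : Prop := out = get_job_function_code_py_alt job_title
instance (job_title : String) (out : String) : Decidable (Spec_get_job_function_code_py job_title out) := by unfold Spec_get_job_function_code_py; infer_instance

-- ===== CLAIM (what is proved, stated in full; the proofs are below) =====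
def Claim_equal_get_job_function_code_py : Prop := ∀ (job_title : String), Dom_get_job_function_code_py job_title → Spec_get_job_function_code_py job_title (get_job_function_code_py job_title)

-- ===== LEMMAS AND PROOFS =====

-- short-hand for one category's slice of the flat table
def pvGrp (g : List String) (p : Nat) (c : String) : List (String × Nat × String) :=
  g.map fun t => (t, p, c)

-- once best is set to priority b, elements of priority ≥ b never replace it
lemma pvKeep (tl : String) (b : Nat) (cd : String) :
    ∀ (l : List (String × Nat × String)), (∀ e ∈ l, b ≤ e.2.1) →
    l.foldl (pvStep tl) (some (b, cd)) = some (b, cd) := by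
  intro l
  induction l with
  | nil => intro _; rfl
  | cons e l ih =>
    intro h
    have hb : b ≤ e.2.1 := h e (List.mem_cons_self)
    have hstep : pvStep tl (some (b, cd)) e = some (b, cd) := by
      unfold pvStep
      simp [Nat.not_lt.mpr hb]
    simp only [List.foldl_cons, hstep]
    exact ih (fun x hx => h x (List.mem_cons_of_mem _ hx))

-- folding one category group from best = none: first match wins
lemma pvGroupNone (tl : String) (p : Nat) (c : String) (g : List String) :
    (pvGrp g p c).foldl (pvStep tl) none =
      if g.any (fun t => PySem.Str.isIn t tl) then some (p, c) else none := by
  induction g with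
  | nil => rfl
  | cons t g ih =>
    have hstep : pvStep tl none (t, p, c) =
        if PySem.Str.isIn t tl then some (p, c) else none := by
      unfold pvStep
      cases PySem.Str.isIn t tl <;> rfl
    cases hm : PySem.Str.isIn t tl with
    | true =>
      simp only [pvGrp, List.map_cons, List.foldl_cons, List.any_cons, hm, Bool.true_or, if_true,
        hstep]
      exact pvKeep tl p c _ (by
        intro e he
        simp only [List.mem_map] at he
        obtain ⟨t', _, rfl⟩ := he
        exact Nat.le_refl p)
    | false =>
      simp only [pvGrp, List.map_cons, List.foldl_cons, List.any_cons, hm, Bool.false_or, hstep]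
      exact ih

-- the flat table is the concatenation of the nine category groups
lemma pvTerms_eq :
    pvTerms =
      pvGrp ["engineer", "developer", "programmer", "architect"] 0 "eng" ++
      (pvGrp ["sales", "account", "business development"] 1 "sal" ++
      (pvGrp ["marketing", "brand", "content", "social media"] 2 "mkt" ++
      (pvGrp ["hr", "human resources", "recruiter", "talent"] 3 "hum" ++
      (pvGrp ["finance", "accounting", "controller", "analyst"] 4 "fin" ++
      (pvGrp ["operations", "logistics", "supply chain"] 5 "ops" ++
      (pvGrp ["design", "creative", "ux", "ui"] 6 "des" ++
      (pvGrp ["legal", "counsel", "attorney", "compliance"] 7 "leg" ++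
      pvGrp ["consulting", "strategy", "advisory"] 8 "con"))))))) := by
  rfl

-- ===== VERDICT (by name: the statement is the Claim_ definition above) =====
theorem get_job_function_code_py_spec : Claim_equal_get_job_function_code_py := by
  intro s _
  show get_job_function_code_py s = get_job_function_code_py_alt s
  unfold get_job_function_code_py get_job_function_code_py_alt
  dsimp only
  rw [pvTerms_eq]
  set tl := PySem.Str.lower s with htl
  rw [List.foldl_append, pvGroupNone]
  by_cases h0 : (["engineer", "developer", "programmer", "architect"].any fun term => PySem.Str.isIn term tl) = true
  · rw [if_pos h0, if_pos h0, pvKeep tl 0 "eng"]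
    decide
  · rw [if_neg h0, if_neg h0]
    rw [List.foldl_append, pvGroupNone]
    by_cases h1 : (["sales", "account", "business development"].any fun term => PySem.Str.isIn term tl) = true
    · rw [if_pos h1, if_pos h1, pvKeep tl 1 "sal"]
      decide
    · rw [if_neg h1, if_neg h1]
      rw [List.foldl_append, pvGroupNone]
      by_cases h2 : (["marketing", "brand", "content", "social media"].any fun term => PySem.Str.isIn term tl) = true
      · rw [if_pos h2, if_pos h2, pvKeep tl 2 "mkt"]
        decide
      · rw [if_neg h2, if_neg h2]
        rw [List.foldl_append, pvGroupNone]
        by_cases h3 : (["hr", "human resources", "recruiter", "talent"].any fun term => PySem.Str.isIn term tl) = true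
        · rw [if_pos h3, if_pos h3, pvKeep tl 3 "hum"]
          decide
        · rw [if_neg h3, if_neg h3]
          rw [List.foldl_append, pvGroupNone]
          by_cases h4 : (["finance", "accounting", "controller", "analyst"].any fun term => PySem.Str.isIn term tl) = true
          · rw [if_pos h4, if_pos h4, pvKeep tl 4 "fin"]
            decide
          · rw [if_neg h4, if_neg h4]
            rw [List.foldl_append, pvGroupNone]
            by_cases h5 : (["operations", "logistics", "supply chain"].any fun term => PySem.Str.isIn term tl) = true
            · rw [if_pos h5, if_pos h5, pvKeep tl 5 "ops"]
              decide
            · rw [if_neg h5, if_neg h5]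
              rw [List.foldl_append, pvGroupNone]
              by_cases h6 : (["design", "creative", "ux", "ui"].any fun term => PySem.Str.isIn term tl) = true
              · rw [if_pos h6, if_pos h6, pvKeep tl 6 "des"]
                decide
              · rw [if_neg h6, if_neg h6]
                rw [List.foldl_append, pvGroupNone]
                by_cases h7 : (["legal", "counsel", "attorney", "compliance"].any fun term => PySem.Str.isIn term tl) = true
                · rw [if_pos h7, if_pos h7, pvKeep tl 7 "leg"]
                  decide
                · rw [if_neg h7, if_neg h7]
                  rw [pvGroupNone]
                  by_cases h8 : (["consulting", "strategy", "advisory"].any fun term => PySem.Str.isIn term tl) = true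
                  · rw [if_pos h8, if_pos h8]
                  · rw [if_neg h8, if_neg h8]
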